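-- pv_equiv track=rewrite | github.com/ihsynzd14/Text-Analyze-Python | programmUno.py | GranVocabolario
-- ===== SOURCE A (Python) =====
-- def GranVocabolario(list_tokens):
--     #creo la lista vocabolario di incremento 500
--     lista_vocabolario500 = []
--     #creo la lista di incremento
--     lista_incrementale = []
--     #creo la lista di vocabolario
--     lista_vocabolario = []
--
--     #creo la lista di ciclo pero con incremento di range tra x : x+500  esmp:  2500 : 3000
--     #in stesso tempo anche scorriamo ciclo for con range da 0 a length di list_tokens incremento di 500 (in ogni ciclo aggiorna i numeri perche di x)
--     lista_ciclo = [list_tokens[x:x+500] for x in range(0, len(list_tokens),500)]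
--     for lista in lista_ciclo:
--            #incrementando lista di incremento con ciclo for per calcolare lista vocabolario
--            lista_incrementale = lista_incrementale + lista
--            #con set - (se ci sono elementi occorre piu di una volta setta gli elementi a singolo elemento)
--            lista_vocabolario = set(lista_incrementale)
--            #conto quanti ci sono nella lista vocabolario
--            contatore = len(lista_vocabolario)
--            #alla fine metto il numero di vocabolario (+500) alla lista
--            lista_vocabolario500.append(contatore)
--
--     return lista_vocabolario500
-- ===== SOURCE B (Python) =====
-- def GranVocabolario(list_tokens):
--     # One pass: maintain a single running set; record its size at each
--     # 500-token boundary and once more for a trailing partial chunk.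
--     result = []
--     seen = set()
--     c = 0
--     for tok in list_tokens:
--         seen.add(tok)
--         c += 1
--         if c == 500:
--             result.append(len(seen))
--             c = 0
--     if c != 0:
--         result.append(len(seen))
--     return result
-- ===== Notes on version B (the rewrite author's own statement) =====
-- stated objective: faster
-- what changed: Instead of rebuilding the cumulative prefix list and recomputing set() over it for every 500-token chunk, B makes one pass maintaining a single running set and a within-chunk counter, recording the set's size at each chunk boundary and once more for a trailing partial chunk.
import Mathlib
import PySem

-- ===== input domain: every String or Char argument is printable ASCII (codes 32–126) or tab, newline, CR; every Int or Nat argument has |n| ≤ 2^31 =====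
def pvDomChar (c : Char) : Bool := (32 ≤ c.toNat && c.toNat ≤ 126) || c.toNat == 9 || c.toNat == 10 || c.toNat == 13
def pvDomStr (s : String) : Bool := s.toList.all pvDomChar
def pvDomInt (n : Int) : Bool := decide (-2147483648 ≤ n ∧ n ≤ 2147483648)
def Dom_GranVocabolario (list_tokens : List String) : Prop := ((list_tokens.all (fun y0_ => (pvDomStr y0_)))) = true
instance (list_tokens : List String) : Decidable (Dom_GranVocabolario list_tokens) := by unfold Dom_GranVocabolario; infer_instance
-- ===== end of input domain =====

-- B replaces A's per-chunk rebuild of the cumulative list and recomputation of set() over it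
-- by a single pass with one running set and a within-chunk counter (objective: faster).

-- ===== PORT A =====
-- loop body of A's 'for lista in lista_ciclo' (state: lista_incrementale, lista_vocabolario500)
def granStep (st : List String × List Int) (lista : List String) : List String × List Int :=
  let lista_incrementale := st.1 ++ lista
  let lista_vocabolario := PySem.Set.ofList lista_incrementale
  let contatore : Int := PySem.Set.len lista_vocabolario
  (lista_incrementale, st.2 ++ [contatore])

def GranVocabolario (list_tokens : List String) : List Int :=
  let lista_ciclo := (PySem.List.pyRange 0 (PySem.List.len list_tokens) 500).map
    (fun x => PySem.List.slice list_tokens (some x) (some (x + 500)))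
  (lista_ciclo.foldl granStep ([], [])).2

-- ===== PORT B =====
-- loop body of B's 'for tok in list_tokens' (state: seen, result, c)
def granAltStep (st : PySem.Set String × List Int × Int) (tok : String) :
    PySem.Set String × List Int × Int :=
  let seen := PySem.Set.add st.1 tok
  let c := st.2.2 + 1
  if c = 500 then (seen, st.2.1 ++ [PySem.Set.len seen], 0)
  else (seen, st.2.1, c)

def GranVocabolario_alt (list_tokens : List String) : List Int :=
  let st := list_tokens.foldl granAltStep (PySem.Set.empty, [], 0)
  if st.2.2 ≠ 0 then st.2.1 ++ [PySem.Set.len st.1] else st.2.1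

-- ===== PRECONDITION & SPEC =====
def Spec_GranVocabolario (list_tokens : List String) (out : List Int) : Prop := out = GranVocabolario_alt list_tokens
instance (list_tokens : List String) (out : List Int) : Decidable (Spec_GranVocabolario list_tokens out) := by unfold Spec_GranVocabolario; infer_instance

-- ===== CLAIM (what is proved, stated in full; the proofs are below) =====
def Claim_equal_GranVocabolario : Prop := ∀ (list_tokens : List String), Dom_GranVocabolario list_tokens → Spec_GranVocabolario list_tokens (GranVocabolario list_tokens)

-- ===== LEMMAS AND PROOFS =====

-- the 500-token chunks of a list, as A's slice comprehension produces them
def pvChunks (ts : List String) : List (List String) :=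
  if h : ts = [] then [] else ts.take 500 :: pvChunks (ts.drop 500)
termination_by ts.length
decreasing_by
  simp only [List.length_drop]
  have : 0 < ts.length := List.length_pos_iff.mpr h
  omega

-- the common specification: cumulative distinct counts at each chunk boundary
def pvBounds (seen : PySem.Set String) (ts : List String) : List Int :=
  if h : ts = [] then []
  else
    let seen' := seen.update (ts.take 500)
    PySem.Set.len seen' :: pvBounds seen' (ts.drop 500)
termination_by ts.length
decreasing_by
  simp only [List.length_drop]
  have : 0 < ts.length := List.length_pos_iff.mpr h
  omega

theorem pyRange500_nil {a b : Int} (h : b ≤ a) : PySem.List.pyRange a b 500 = [] := by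
  rw [PySem.List.pyRange_of_pos a b (by norm_num)]
  simp [h.not_gt]

theorem pyRange500_cons {a b : Int} (h : a < b) :
    PySem.List.pyRange a b 500 = a :: PySem.List.pyRange (a + 500) b 500 := by
  rw [PySem.List.pyRange_of_pos a b (by norm_num),
      PySem.List.pyRange_of_pos (a + 500) b (by norm_num)]
  have hm : (if a < b then ((b - a + 500 - 1) / 500).toNat else 0)
      = (if a + 500 < b then ((b - (a + 500) + 500 - 1) / 500).toNat else 0) + 1 := by
    split_ifs <;> omega
  rw [hm, List.range_succ_eq_map, List.map_cons, List.map_map]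
  refine congrArg₂ _ (by norm_num) (List.map_congr_left fun k _ => ?_)
  simp only [Function.comp_apply]
  push_cast
  ring

theorem map_slice_eq_chunks :
    ∀ (n : Nat) (full ts : List String) (j : Nat), ts.length ≤ n → full.drop j = ts →
      (PySem.List.pyRange (j : Int) ((j : Int) + (ts.length : Int)) 500).map
        (fun x => PySem.List.slice full (some x) (some (x + 500))) = pvChunks ts := by
  intro n
  induction n with
  | zero =>
    intro full ts j hlen hdrop
    have hts : ts = [] := List.length_eq_zero_iff.mp (Nat.le_zero.mp hlen)
    subst hts
    rw [pyRange500_nil (by simp)]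
    rw [pvChunks]
    simp
  | succ n ih =>
    intro full ts j hlen hdrop
    by_cases hts : ts = []
    · subst hts
      rw [pyRange500_nil (by simp)]
      rw [pvChunks]
      simp
    · have hpos : 0 < ts.length := List.length_pos_iff.mpr hts
      rw [pyRange500_cons (by omega), List.map_cons]
      rw [pvChunks]
      rw [dif_neg hts]
      have hhead : PySem.List.slice full (some (j : Int)) (some ((j : Int) + 500)) = ts.take 500 := by
        have := PySem.List.slice_natCast_add full j 500
        rw [show ((j : Int) + (500 : Int)) = ((j : Int) + ((500 : Nat) : Int)) by norm_num] at *
        rw [this, hdrop]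
      rw [hhead]
      congr 1
      by_cases hbig : 500 < ts.length
      · have := ih full (ts.drop 500) (j + 500)
          (by simp only [List.length_drop]; omega)
          (by rw [← List.drop_drop, hdrop])
        rw [show ((j : Int) + 500) = ((j + 500 : Nat) : Int) by push_cast; ring_nf]
        rw [show ((j : Int) + (ts.length : Int)) = (((j + 500 : Nat) : Int) + ((ts.drop 500).length : Int)) by
          simp only [List.length_drop]; push_cast; omega]
        exact this
      · have hdrop500 : ts.drop 500 = [] := by
          apply List.length_eq_zero_iff.mp
          simp only [List.length_drop]; omega
        rw [pyRange500_nil (by omega), hdrop500, pvChunks]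
        simp

theorem A_fold :
    ∀ (n : Nat) (ts : List String) (inc : List String) (out : List Int), ts.length ≤ n →
      ((pvChunks ts).foldl granStep (inc, out)).2 = out ++ pvBounds (PySem.Set.ofList inc) ts := by
  intro n
  induction n with
  | zero =>
    intro ts inc out hlen
    have hts : ts = [] := List.length_eq_zero_iff.mp (Nat.le_zero.mp hlen)
    subst hts
    rw [pvChunks, pvBounds]
    simp
  | succ n ih =>
    intro ts inc out hlen
    by_cases hts : ts = []
    · subst hts
      rw [pvChunks, pvBounds]
      simp
    · have hpos : 0 < ts.length := List.length_pos_iff.mpr hts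
      rw [pvChunks, dif_neg hts, pvBounds, dif_neg hts, List.foldl_cons]
      have hstep : granStep (inc, out) (ts.take 500)
          = (inc ++ ts.take 500, out ++ [PySem.Set.len ((PySem.Set.ofList inc).update (ts.take 500))]) := by
        simp [granStep, PySem.Set.ofList_append]
      rw [hstep]
      rw [ih (ts.drop 500) (inc ++ ts.take 500) _ (by simp; omega)]
      rw [PySem.Set.ofList_append]
      simp

theorem B_block :
    ∀ (a : List String) (seen : PySem.Set String) (out : List Int) (c : Int),
      0 ≤ c → c < 500 → c + (a.length : Int) ≤ 500 →
      a.foldl granAltStep (seen, out, c) =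
        (seen.update a,
         out ++ (if c + (a.length : Int) = 500 then [PySem.Set.len (seen.update a)] else []),
         if c + (a.length : Int) = 500 then 0 else c + (a.length : Int)) := by
  intro a
  induction a with
  | nil =>
    intro seen out c h0 hlt hle
    have hne : ¬ (c + ((([] : List String)).length : Int) = 500) := by simp; omega
    rw [List.foldl_nil, PySem.Set.update_nil, if_neg hne, if_neg hne]
    simp
  | cons x rest ih =>
    intro seen out c h0 hlt hle
    rw [List.foldl_cons]
    by_cases hc : c + 1 = 500
    · have hrest : rest = [] := by
        have : rest.length = 0 := by simp at hle; omega
        exact List.length_eq_zero_iff.mp this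
      subst hrest
      have h1 : c + ((([x] : List String)).length : Int) = 500 := by simp; omega
      rw [if_pos h1, if_pos h1, List.foldl_nil]
      simp [granAltStep, hc, PySem.Set.update_cons, PySem.Set.update_nil]
    · have hstep : granAltStep (seen, out, c) x = (seen.add x, out, c + 1) := by
        simp [granAltStep, hc]
      rw [hstep, ih (seen.add x) out (c + 1) (by omega) (by simp at hle; omega) (by simp at hle ⊢; omega)]
      rw [PySem.Set.update_cons,
          show c + 1 + (rest.length : Int) = c + ((x :: rest).length : Int) from by push_cast [List.length_cons]; ring]

-- B's epilogue ('if c != 0: result.append(len(seen))'), factored for the induction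
def pvBFinish (st : PySem.Set String × List Int × Int) : List Int :=
  if st.2.2 ≠ 0 then st.2.1 ++ [PySem.Set.len st.1] else st.2.1

theorem B_gen :
    ∀ (n : Nat) (ts : List String) (seen : PySem.Set String) (out : List Int), ts.length ≤ n →
      pvBFinish (ts.foldl granAltStep (seen, out, 0)) = out ++ pvBounds seen ts := by
  intro n
  induction n with
  | zero =>
    intro ts seen out hlen
    have hts : ts = [] := List.length_eq_zero_iff.mp (Nat.le_zero.mp hlen)
    subst hts
    rw [pvBounds]
    simp [pvBFinish]
  | succ n ih =>
    intro ts seen out hlen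
    by_cases hts : ts = []
    · subst hts
      rw [pvBounds]
      simp [pvBFinish]
    · have hpos : 0 < ts.length := List.length_pos_iff.mpr hts
      rw [pvBounds, dif_neg hts]
      conv_lhs => rw [← List.take_append_drop 500 ts, List.foldl_append]
      rw [B_block (ts.take 500) seen out 0 (by omega) (by omega)
            (by simp only [List.length_take]; push_cast; omega)]
      by_cases hbig : 500 ≤ ts.length
      · have h500 : ((ts.take 500).length : Int) = 500 := by simp; omega
        rw [if_pos (by omega), if_pos (by omega)]
        rw [ih (ts.drop 500) _ _ (by simp; omega)]
        simp
      · have hsmall : (ts.take 500).length = ts.length := by simp; omega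
        rw [if_neg (by rw [hsmall]; omega), if_neg (by rw [hsmall]; omega)]
        have hdrop : ts.drop 500 = [] := List.length_eq_zero_iff.mp (by simp; omega)
        rw [hdrop, List.foldl_nil, pvBFinish]
        rw [if_pos (by simp [hsmall]; omega)]
        have hnil : ∀ s : PySem.Set String, pvBounds s [] = [] := fun s => by rw [pvBounds]; simp
        simp [hnil]

-- ===== VERDICT (by name: the statement is the Claim_ definition above) =====
theorem GranVocabolario_spec : Claim_equal_GranVocabolario := by
  intro ts _
  unfold Spec_GranVocabolario GranVocabolario GranVocabolario_alt
  have hchunks := map_slice_eq_chunks ts.length ts ts 0 le_rfl (by simp)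
  simp only [PySem.List.len_eq, Nat.cast_zero, zero_add] at hchunks ⊢
  rw [hchunks]
  rw [A_fold ts.length ts [] [] le_rfl]
  have hB := B_gen ts.length ts PySem.Set.empty [] le_rfl
  simp only [pvBFinish] at hB
  simp only [List.nil_append] at *
  rw [hB]
  rfl
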